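-- pv_equiv track=rewrite | github.com/NikitaNikell/Python_developer_summer-2024_Trial_exam_Tinkoff | Task_2/max_fives_count.py | max_fives_count_in_sequence
-- ===== SOURCE A (Python) =====
-- def max_fives_count_in_sequence(marks):
--     max_fives_count = 0
--     current_fives_count = 0
--     current_sequence = 0
--     found_sequence = False
--
--     for mark in marks:
--         if mark == 5 and current_sequence < 7:
--             current_fives_count += 1
--         if mark not in [2, 3]:
--             current_sequence += 1
--             if current_sequence == 7:
--                 found_sequence = True
--         else:
--             if found_sequence:
--                 max_fives_count = max(max_fives_count, current_fives_count)
--                 found_sequence = False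
--             current_fives_count = 0
--             current_sequence = 0
--
--     if found_sequence:
--         max_fives_count = max(max_fives_count, current_fives_count)
--
--     if max_fives_count == 0:
--         return -1
--     else:
--         return max_fives_count
-- ===== SOURCE B (Python) =====
-- def max_fives_count_in_sequence(marks):
--     runs = []
--     cur = []
--     for m in marks:
--         if m in (2, 3):
--             runs.append(cur)
--             cur = []
--         else:
--             cur.append(m)
--     runs.append(cur)
--     best = max((run[:7].count(5) for run in runs if len(run) >= 7), default=0)
--     return best if best > 0 else -1
-- ===== Notes on version B (the rewrite author's own statement) =====
-- stated objective: alternative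
-- what changed: Replaces A's single loop over four interleaved state variables with a group-then-evaluate decomposition: partition marks into maximal runs free of 2/3, then take the max over runs of length >= 7 of the count of 5s among the run's first seven elements, returning -1 when that max is 0.
import Mathlib
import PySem

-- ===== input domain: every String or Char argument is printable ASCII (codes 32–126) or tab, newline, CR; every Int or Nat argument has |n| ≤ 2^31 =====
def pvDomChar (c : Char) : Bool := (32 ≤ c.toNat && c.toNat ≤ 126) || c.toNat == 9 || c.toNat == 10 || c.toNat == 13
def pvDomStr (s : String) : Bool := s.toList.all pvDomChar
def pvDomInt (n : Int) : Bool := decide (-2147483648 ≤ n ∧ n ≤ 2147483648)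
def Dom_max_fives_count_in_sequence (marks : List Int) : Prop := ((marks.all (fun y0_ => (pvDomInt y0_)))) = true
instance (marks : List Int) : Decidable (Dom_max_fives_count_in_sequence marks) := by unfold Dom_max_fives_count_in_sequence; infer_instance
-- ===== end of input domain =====

-- B replaces A's four interleaved loop state variables with a group-then-evaluate
-- decomposition (partition into 2/3-free runs, then score each run); objective: alternative.


-- ===== PORT A =====
-- loop body of A: state (max_fives_count, current_fives_count, current_sequence, found_sequence)
def pvStepA (s : Int × Int × Int × Bool) (mark : Int) : Int × Int × Int × Bool :=
  let mx := s.1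
  let c5 := if mark == 5 && s.2.2.1 < 7 then s.2.1 + 1 else s.2.1
  if !(mark == 2 || mark == 3) then
    let seq := s.2.2.1 + 1
    let found := if seq == 7 then true else s.2.2.2
    (mx, c5, seq, found)
  else
    (if s.2.2.2 then max mx c5 else mx, 0, 0, false)

def max_fives_count_in_sequence (marks : List Int) : Int :=
  let s := marks.foldl pvStepA (0, 0, 0, false)
  let mx := if s.2.2.2 then max s.1 s.2.1 else s.1
  if mx == 0 then -1 else mx

-- ===== PORT B =====
-- loop of Source B building (runs, cur)
def pvStepSplit (st : List (List Int) × List Int) (m : Int) : List (List Int) × List Int :=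
  if m == 2 || m == 3 then (st.1 ++ [st.2], []) else (st.1, st.2 ++ [m])

-- run[:7].count(5), run scored only when len(run) >= 7; max with default 0 as a fold
def pvScore (b : Int) (r : List Int) : Int :=
  if 7 ≤ r.length then max b ((r.take 7).count 5 : Int) else b

def max_fives_count_in_sequence_alt (marks : List Int) : Int :=
  let st := marks.foldl pvStepSplit ([], [])
  let runs := st.1 ++ [st.2]
  let best := runs.foldl pvScore 0
  if 0 < best then best else -1

-- ===== PRECONDITION & SPEC =====
def Spec_max_fives_count_in_sequence (marks : List Int) (out : Int) : Prop := out = max_fives_count_in_sequence_alt marks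
instance (marks : List Int) (out : Int) : Decidable (Spec_max_fives_count_in_sequence marks out) := by unfold Spec_max_fives_count_in_sequence; infer_instance

-- ===== CLAIM (what is proved, stated in full; the proofs are below) =====
def Claim_equal_max_fives_count_in_sequence : Prop := ∀ (marks : List Int), Dom_max_fives_count_in_sequence marks → Spec_max_fives_count_in_sequence marks (max_fives_count_in_sequence marks)

-- ===== LEMMAS AND PROOFS =====

-- final max extraction from A's loop state
def pvFinish (s : Int × Int × Int × Bool) : Int := if s.2.2.2 then max s.1 s.2.1 else s.1

-- recursive characterization of the run splitting
def pvSplitAux (cur : List Int) : List Int → List (List Int)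
  | [] => [cur]
  | x :: xs => if x == 2 || x == 3 then cur :: pvSplitAux [] xs else pvSplitAux (cur ++ [x]) xs

lemma pvSplit_fold (marks : List Int) : ∀ (rs : List (List Int)) (cur : List Int),
    (marks.foldl pvStepSplit (rs, cur)).1 ++ [(marks.foldl pvStepSplit (rs, cur)).2]
      = rs ++ pvSplitAux cur marks := by
  induction marks with
  | nil => intro rs cur; simp [pvSplitAux]
  | cons x xs ih =>
    intro rs cur
    by_cases hx : (x == 2 || x == 3) = true
    · simp [pvStepSplit, hx, pvSplitAux, ih]
    · simp [pvStepSplit, hx, pvSplitAux, ih]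

lemma pvScore_nonneg (rs : List (List Int)) : ∀ (b : Int), 0 ≤ b → 0 ≤ rs.foldl pvScore b := by
  induction rs with
  | nil => intro b hb; simpa using hb
  | cons r rs ih =>
    intro b hb
    apply ih
    unfold pvScore
    split
    · exact le_trans hb (le_max_left _ _)
    · exact hb

lemma pvStepA_sep (s : Int × Int × Int × Bool) (x : Int)
    (hx : (x == 2 || x == 3) = true) (hx5 : (x == 5) = false) :
    pvStepA s x = (if s.2.2.2 then max s.1 s.2.1 else s.1, 0, 0, false) := by
  unfold pvStepA; simp [hx, hx5]

lemma pvStepA_nonsep (mx c5 len : Int) (found : Bool) (x : Int)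
    (hx : (x == 2 || x == 3) = false) :
    pvStepA (mx, c5, len, found) x = (mx, (if x == 5 && len < 7 then c5 + 1 else c5),
      len + 1, if len + 1 == 7 then true else found) := by
  unfold pvStepA; simp [hx]

-- the key loop invariant linking A's fold to B's run list
lemma pvKey (marks : List Int) : ∀ (cur : List Int) (mx : Int),
    pvFinish (marks.foldl pvStepA
        (mx, ((cur.take 7).count 5 : Int), (cur.length : Int), decide (7 ≤ cur.length)))
      = (pvSplitAux cur marks).foldl pvScore mx := by
  induction marks with
  | nil =>
    intro cur mx
    simp only [List.foldl_nil, pvSplitAux, List.foldl_cons, List.foldl_nil, pvFinish, pvScore]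
    by_cases h : 7 ≤ cur.length <;> simp [h]
  | cons x xs ih =>
    intro cur mx
    by_cases hx : (x == 2 || x == 3) = true
    · have hx5 : (x == 5) = false := by
        rcases (by simpa using hx : x = 2 ∨ x = 3) with h | h <;> simp [h]
      have hsp : pvSplitAux cur (x :: xs) = cur :: pvSplitAux [] xs := by
        simp [pvSplitAux, hx]
      have hM : (if decide (7 ≤ cur.length) = true then max mx ((cur.take 7).count 5 : Int) else mx)
          = pvScore mx cur := by
        unfold pvScore; by_cases h : 7 ≤ cur.length <;> simp [h]
      have hIH := ih [] (pvScore mx cur)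
      simp at hIH
      rw [List.foldl_cons, pvStepA_sep _ _ hx hx5, hsp, List.foldl_cons]
      simpa [hM] using hIH
    · have hx' : (x == 2 || x == 3) = false := by simpa using hx
      have hc5 : (if x == 5 && (cur.length : Int) < 7 then ((cur.take 7).count 5 : Int) + 1
                  else ((cur.take 7).count 5 : Int)) = (((cur ++ [x]).take 7).count 5 : Int) := by
        by_cases hl : cur.length < 7
        · have ht : (cur ++ [x]).take 7 = cur ++ [x] := by
            apply List.take_of_length_le; simp; omega
          have ht2 : cur.take 7 = cur := List.take_of_length_le (le_of_lt hl)
          rw [ht, ht2]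
          have hli : ((cur.length : Int) < 7) := by exact_mod_cast hl
          by_cases h5 : x = 5
          · simp [h5, hli, List.count_append]
          · have hb : (x == 5) = false := by simp [h5]
            simp [hb, List.count_append, h5]
        · have ht : (cur ++ [x]).take 7 = cur.take 7 := by
            rw [List.take_append]
            have h0 : 7 - cur.length = 0 := by omega
            simp [h0]
          have hli : ¬ ((cur.length : Int) < 7) := by
            intro h; exact hl (by exact_mod_cast h)
          rw [ht]
          simp [hli]
      have hlen : (cur.length : Int) + 1 = ((cur ++ [x]).length : Int) := by
        simp
      have hfound : (if ((cur.length : Int) + 1 == 7) then true else decide (7 ≤ cur.length))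
          = decide (7 ≤ (cur ++ [x]).length) := by
        by_cases h7 : (cur.length : Int) + 1 = 7
        · have h6 : cur.length = 6 := by
            have : (cur.length : Int) = 6 := by omega
            exact_mod_cast this
          simp [h6]
        · have h6 : cur.length ≠ 6 := by
            intro h
            apply h7
            rw [h]
            norm_num
          simp [h7]
          omega
      have hsp : pvSplitAux cur (x :: xs) = pvSplitAux (cur ++ [x]) xs := by
        simp [pvSplitAux, hx']
      rw [List.foldl_cons, pvStepA_nonsep _ _ _ _ _ hx', hsp, hc5, hfound, hlen]
      exact ih (cur ++ [x]) mx

-- ===== VERDICT (by name: the statement is the Claim_ definition above) =====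
theorem max_fives_count_in_sequence_spec : Claim_equal_max_fives_count_in_sequence := by
  intro marks _
  unfold Spec_max_fives_count_in_sequence max_fives_count_in_sequence max_fives_count_in_sequence_alt
  have hsplit := pvSplit_fold marks [] []
  simp only [List.nil_append] at hsplit
  have hkey := pvKey marks [] 0
  simp at hkey
  unfold pvFinish at hkey
  simp only [hsplit]
  rw [hkey]
  have hnn : (0 : Int) ≤ (pvSplitAux [] marks).foldl pvScore 0 := pvScore_nonneg _ 0 le_rfl
  set b := (pvSplitAux [] marks).foldl pvScore 0 with hb
  by_cases h0 : b = 0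
  · simp [h0]
  · have : 0 < b := lt_of_le_of_ne hnn (Ne.symm h0)
    simp [h0, this]
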